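-- pv_equiv track=rewrite | github.com/svanlee/leetcode-daily-find-valid-matrix-given-row-and-column-sums | solution/solution.py | restoreMatrix
-- ===== SOURCE A (Python) =====
-- from typing import List
--
-- def restoreMatrix(rowSum: List[int], colSum: List[int]) -> List[List[int]]:
--     m, n = len(rowSum), len(colSum)
--     res = [[0] * n for _ in range(m)]
--
--     for i in range(m):
--         for j in range(n):
--             val = min(rowSum[i], colSum[j])
--             res[i][j] = val
--             rowSum[i] -= val
--             colSum[j] -= val
--
--     return res
-- ===== SOURCE B (Python) =====
-- from typing import List
--
-- def restoreMatrix(rowSum: List[int], colSum: List[int]) -> List[List[int]]: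
--     # Profile reformulation: keep h[k] = (running total of all row sums placed so
--     # far) + (sum of the still-unfilled parts of columns 0..k-1).  One row is then
--     # a running-max scan g[k] = max(g[k-1], h[k]) starting from g[0] = h[0] + r,
--     # and each entry is the second difference h[k]-h[k-1] + g[k-1]-g[k]; the new
--     # profile is g.  No min/subtract greedy state, and the inputs are not mutated.
--     n = len(colSum)
--     h = [0] * (n + 1)
--     for k in range(n):
--         h[k + 1] = h[k] + colSum[k]
--     res = []
--     for r in rowSum:
--         g = [0] * (n + 1)
--         g[0] = h[0] + r
--         row = []
--         for k in range(1, n + 1):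
--             g[k] = g[k - 1] if g[k - 1] > h[k] else h[k]
--             row.append(h[k] - h[k - 1] + g[k - 1] - g[k])
--         res.append(row)
--         h = g
--     return res
-- ===== Notes on version B (the rewrite author's own statement) =====
-- stated objective: alternative
-- what changed: B replaces A's greedy min/subtract on mutable row/column remainders by a profile reformulation: it keeps a cumulative prefix profile h of the unfilled column mass, runs one running-max scan g[k]=max(g[k-1],h[k]) per row, and reads each entry off as the second difference h[k]-h[k-1]+g[k-1]-g[k] (B also does not mutate its arguments).
import Mathlib
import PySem

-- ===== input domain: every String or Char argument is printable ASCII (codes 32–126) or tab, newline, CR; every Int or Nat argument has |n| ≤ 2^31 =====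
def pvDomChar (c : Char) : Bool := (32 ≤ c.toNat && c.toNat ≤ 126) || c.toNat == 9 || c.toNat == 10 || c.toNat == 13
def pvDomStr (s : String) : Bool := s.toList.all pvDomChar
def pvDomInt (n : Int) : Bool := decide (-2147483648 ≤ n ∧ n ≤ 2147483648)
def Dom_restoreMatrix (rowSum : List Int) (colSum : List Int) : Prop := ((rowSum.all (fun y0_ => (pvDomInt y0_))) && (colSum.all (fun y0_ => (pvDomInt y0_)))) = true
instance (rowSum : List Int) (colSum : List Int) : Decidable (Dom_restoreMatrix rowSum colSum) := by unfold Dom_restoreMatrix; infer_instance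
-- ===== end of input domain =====

-- B computes the matrix from cumulative column profiles with one running-max scan
-- per row instead of A's greedy min/subtract on mutable remainders; return-value
-- equivalence (A mutates its argument lists in place, B does not).

-- ===== PORT A =====
-- A's inner loop "for j in range(n): val = min(rowSum[i], colSum[j]); res[i][j] = val;
-- rowSum[i] -= val; colSum[j] -= val", as structural recursion threading the current
-- rowSum[i] value and the updated colSum list (same values, same order).
def pvRowA (r : Int) (cols : List Int) : List Int × List Int :=
  match cols with
  | [] => ([], [])
  | c :: cs =>
    let v := min r c
    let p := pvRowA (r - v) cs
    (v :: p.1, (c - v) :: p.2)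

-- A's outer loop over i in range(m): row i uses rowSum[i] and the colSum state.
def restoreMatrix (rowSum : List Int) (colSum : List Int) : List (List Int) :=
  match rowSum with
  | [] => []
  | r :: rs =>
    let p := pvRowA r colSum
    p.1 :: restoreMatrix rs p.2

-- ===== PORT B =====
-- Source B's "for k in range(n): h[k+1] = h[k] + colSum[k]": the prefix profile after h0.
def pvProf (a : Int) (cs : List Int) : List Int :=
  match cs with
  | [] => []
  | c :: cs => (a + c) :: pvProf (a + c) cs

-- Source B's inner loop "for k in range(1, n+1): g[k] = g[k-1] if g[k-1] > h[k] else h[k];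
-- row.append(h[k] - h[k-1] + g[k-1] - g[k])": returns (row, tail of the new profile g).
def pvRowScanB (hprev gprev : Int) (hs : List Int) : List Int × List Int :=
  match hs with
  | [] => ([], [])
  | hk :: rest =>
    let gk := if gprev > hk then gprev else hk
    let p := pvRowScanB hk gk rest
    ((hk - hprev + gprev - gk) :: p.1, gk :: p.2)

-- Source B's outer loop "for r in rowSum: g[0] = h[0] + r; …; res.append(row); h = g",
-- with the profile list threaded as its head h0 and tail hs.
def pvOuterB (rows : List Int) (h0 : Int) (hs : List Int) : List (List Int) :=
  match rows with
  | [] => []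
  | r :: rs =>
    let g0 := h0 + r
    let p := pvRowScanB h0 g0 hs
    p.1 :: pvOuterB rs g0 p.2

def restoreMatrix_alt (rowSum : List Int) (colSum : List Int) : List (List Int) :=
  pvOuterB rowSum 0 (pvProf 0 colSum)

-- ===== PRECONDITION & SPEC =====
def Spec_restoreMatrix (rowSum : List Int) (colSum : List Int) (out : List (List Int)) : Prop := out = restoreMatrix_alt rowSum colSum
instance (rowSum : List Int) (colSum : List Int) (out : List (List Int)) : Decidable (Spec_restoreMatrix rowSum colSum out) := by unfold Spec_restoreMatrix; infer_instance

-- ===== CLAIM (what is proved, stated in full; the proofs are below) =====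
def Claim_equal_restoreMatrix : Prop := ∀ (rowSum : List Int) (colSum : List Int), Dom_restoreMatrix rowSum colSum → Spec_restoreMatrix rowSum colSum (restoreMatrix rowSum colSum)

-- ===== LEMMAS AND PROOFS =====

-- One row: B's running-max scan over the profile of the current column remainders
-- computes exactly A's row of min's, and the new profile is the profile of A's
-- updated remainders shifted by the freshly placed row total.
lemma rowScan_eq_rowA : ∀ (cs : List Int) (a r : Int),
    pvRowScanB a (a + r) (pvProf a cs) =
      ((pvRowA r cs).1, pvProf (a + r) (pvRowA r cs).2) := by
  intro cs
  induction cs with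
  | nil => intro a r; rfl
  | cons c cs ih =>
    intro a r
    have hgk : (if a + r > a + c then a + r else a + c) = a + max r c := by
      rcases le_or_gt r c with h | h
      · rw [if_neg (by omega), max_eq_right h]
      · rw [if_pos (by omega), max_eq_left (le_of_lt h)]
    have hstep := ih (a + c) (max r c - c)
    have harg : a + c + (max r c - c) = a + max r c := by omega
    rw [harg] at hstep
    have hrem : max r c - c = r - min r c := by omega
    rw [hrem] at hstep
    simp only [pvProf, pvRowScanB, pvRowA, hgk, hstep]
    have h1 : a + c - a + (a + r) - (a + max r c) = min r c := by omega
    have h2 : a + max r c = a + r + (c - min r c) := by omega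
    rw [h1, h2]

-- The outer loops agree whenever B's profile is the profile of A's column state.
lemma outerB_eq_restoreMatrix : ∀ (rows cs : List Int) (a : Int),
    pvOuterB rows a (pvProf a cs) = restoreMatrix rows cs := by
  intro rows
  induction rows with
  | nil => intro cs a; rfl
  | cons r rs ih =>
    intro cs a
    simp only [pvOuterB, restoreMatrix, rowScan_eq_rowA cs a r]
    exact congrArg _ (ih (pvRowA r cs).2 (a + r))

-- ===== VERDICT (by name: the statement is the Claim_ definition above) =====
theorem restoreMatrix_spec : Claim_equal_restoreMatrix := by
  intro rowSum colSum _
  unfold Spec_restoreMatrix restoreMatrix_alt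
  exact (outerB_eq_restoreMatrix rowSum colSum 0).symm
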